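-- pv_equiv track=rewrite | github.com/jgonsie/Deep-Convection | SRC/models.py | sorted_learned_keys
-- ===== SOURCE A (Python) =====
-- from typing import (Any, Dict, List, Optional, Mapping, Set, TypeVar, Union)
--
-- def sorted_learned_keys(a: Set) -> List:
--   """Returns the sorted learned keys."""
--   x, y, others = [],[],[]
--   for key in a:
--       if key[-1] == 'x':
--           x.append(key)
--       elif key[-1] == 'y':
--           y.append(key)
--       else: others.append(key)
--
--   return sorted(x)+sorted(y)+sorted(others)
-- ===== SOURCE B (Python) =====
-- def sorted_learned_keys(a):
--   """Returns the sorted learned keys."""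
--   def group(key):
--     return {'x': 0, 'y': 1}.get(key[-1], 2)
--   return sorted(a, key=lambda key: (group(key), key))
-- ===== Notes on version B (the rewrite author's own statement) =====
-- stated objective: idiomatic
-- what changed: Replaces the three manual buckets each sorted separately by a single sorted() call with a composite (group-rank, key) tuple key.
import Mathlib
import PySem

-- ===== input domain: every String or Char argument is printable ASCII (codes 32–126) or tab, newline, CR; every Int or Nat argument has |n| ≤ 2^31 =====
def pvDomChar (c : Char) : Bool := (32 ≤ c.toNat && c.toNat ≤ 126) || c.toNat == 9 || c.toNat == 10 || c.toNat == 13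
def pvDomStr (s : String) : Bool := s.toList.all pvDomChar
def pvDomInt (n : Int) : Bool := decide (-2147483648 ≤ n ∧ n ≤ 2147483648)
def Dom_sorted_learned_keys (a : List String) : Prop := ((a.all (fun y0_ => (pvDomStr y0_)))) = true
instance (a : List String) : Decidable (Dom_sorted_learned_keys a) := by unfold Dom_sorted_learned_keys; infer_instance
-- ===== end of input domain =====

-- B replaces A's three manual last-char buckets (each sorted separately) by one sorted() call
-- with a composite (group-rank, key) tuple key; idiomatic, same behaviour and cost.

-- ===== PORT A =====
def sorted_learned_keys (a : List String) : List String :=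
  let st := a.foldl
    (fun (acc : List String × List String × List String) key =>
      if PySem.Str.pyGet? key (-1) == some 'x' then (acc.1 ++ [key], acc.2.1, acc.2.2)
      else if PySem.Str.pyGet? key (-1) == some 'y' then (acc.1, acc.2.1 ++ [key], acc.2.2)
      else (acc.1, acc.2.1, acc.2.2 ++ [key]))
    ([], [], [])
  PySem.List.sorted st.1 (fun k => k) false ++ PySem.List.sorted st.2.1 (fun k => k) false
    ++ PySem.List.sorted st.2.2 (fun k => k) false

-- ===== PORT B =====
-- {'x': 0, 'y': 1}.get(key[-1], 2); the `none` arm is key[-1] on "", where Python raises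
-- IndexError (outside Pre_).
def pvGroup (key : String) : Int :=
  match PySem.Str.pyGet? key (-1) with
  | some c => PySem.Dict.getD (PySem.Dict.ofList [('x', (0 : Int)), ('y', 1)]) c 2
  | none => 2

def sorted_learned_keys_alt (a : List String) : List String :=
  PySem.List.sorted2 a pvGroup (fun key => key) false

-- ===== PRECONDITION & SPEC =====
-- Pre_ excludes exactly the inputs containing an empty string, on which key[-1] raises IndexError
-- in both A and B.
def Pre_sorted_learned_keys (a : List String) : Prop := ∀ s ∈ a, s ≠ ""
instance (a : List String) : Decidable (Pre_sorted_learned_keys a) := by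
  unfold Pre_sorted_learned_keys; infer_instance

def pvWitness_sorted_learned_keys : List String := ["wx", "c", "by", "ax"]

def Spec_sorted_learned_keys (a : List String) (out : List String) : Prop := out = sorted_learned_keys_alt a
instance (a : List String) (out : List String) : Decidable (Spec_sorted_learned_keys a out) := by unfold Spec_sorted_learned_keys; infer_instance

-- ===== CLAIM (what is proved, stated in full; the proofs are below) =====
def Claim_equal_sorted_learned_keys : Prop := ∀ (a : List String), Dom_sorted_learned_keys a → Pre_sorted_learned_keys a → Spec_sorted_learned_keys a (sorted_learned_keys a)

-- ===== LEMMAS AND PROOFS =====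

-- The three bucket predicates of A's loop (in elif order).
def pvB0 (k : String) : Bool := PySem.Str.pyGet? k (-1) == some 'x'
def pvB1 (k : String) : Bool := PySem.Str.pyGet? k (-1) == some 'y'
def pvB2 (k : String) : Bool := !pvB1 k && !pvB0 k

-- B's composite sort key, as a single lexicographic key.
def pvKey (k : String) : Lex (Int × String) := toLex (pvGroup k, k)

lemma pvGroup_of_B0 {k : String} (h : pvB0 k = true) : pvGroup k = 0 := by
  simp only [pvB0, beq_iff_eq] at h
  unfold pvGroup
  rw [h]
  rfl

lemma pvGroup_of_B1 {k : String} (h : pvB1 k = true) : pvGroup k = 1 := by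
  simp only [pvB1, beq_iff_eq] at h
  unfold pvGroup
  rw [h]
  rfl

lemma pvGroup_of_B2 {k : String} (h : pvB2 k = true) : pvGroup k = 2 := by
  simp only [pvB2, pvB0, pvB1, Bool.and_eq_true, Bool.not_eq_true', beq_eq_false_iff_ne,
    ne_eq] at h
  obtain ⟨h1, h0⟩ := h
  unfold pvGroup
  cases hg : PySem.Str.pyGet? k (-1) with
  | none => rfl
  | some c =>
    rw [hg] at h0 h1
    have hcx : ('x' : Char) ≠ c := fun he => h0 (by rw [← he])
    have hcy : ('y' : Char) ≠ c := fun he => h1 (by rw [← he])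
    have hd : PySem.Dict.ofList [('x', (0 : Int)), ('y', 1)] = PySem.Dict.mk [('x', 0), ('y', 1)] := by
      decide
    rw [hd]
    simp [PySem.Dict.getD, hcx, hcy, PySem.Dict.get?]

-- A's loop computes the three filters (appended to the running accumulators).
lemma pvBucketFold (a : List String)
    (acc : List String × List String × List String) :
    a.foldl
      (fun (acc : List String × List String × List String) key =>
        if PySem.Str.pyGet? key (-1) == some 'x' then (acc.1 ++ [key], acc.2.1, acc.2.2)
        else if PySem.Str.pyGet? key (-1) == some 'y' then (acc.1, acc.2.1 ++ [key], acc.2.2)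
        else (acc.1, acc.2.1, acc.2.2 ++ [key])) acc
    = (acc.1 ++ a.filter pvB0, acc.2.1 ++ a.filter pvB1, acc.2.2 ++ a.filter pvB2) := by
  have hstep : (fun (acc : List String × List String × List String) (key : String) =>
      if PySem.Str.pyGet? key (-1) == some 'x' then (acc.1 ++ [key], acc.2.1, acc.2.2)
      else if PySem.Str.pyGet? key (-1) == some 'y' then (acc.1, acc.2.1 ++ [key], acc.2.2)
      else (acc.1, acc.2.1, acc.2.2 ++ [key]))
    = (fun (acc : List String × List String × List String) (key : String) =>
      if pvB0 key then (acc.1 ++ [key], acc.2.1, acc.2.2)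
      else if pvB1 key then (acc.1, acc.2.1 ++ [key], acc.2.2)
      else (acc.1, acc.2.1, acc.2.2 ++ [key])) := rfl
  rw [hstep]
  induction a generalizing acc with
  | nil => simp
  | cons k t ih =>
    cases hb0 : pvB0 k with
    | true =>
      have hx : PySem.List.pyGet? k.toList (-1) = some 'x' := by
        simpa [pvB0] using hb0
      have hb1 : pvB1 k = false := by simp [pvB1, hx]
      have hb2 : pvB2 k = false := by simp [pvB2, pvB0, hx]
      simp only [List.foldl_cons, hb0, hb1, hb2, if_true, List.filter_cons, ih]
      simp [List.append_assoc]
    | false =>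
      cases hb1 : pvB1 k with
      | true =>
        have hb2 : pvB2 k = false := by simp [pvB2, hb1]
        simp only [List.foldl_cons, hb0, hb1, hb2, List.filter_cons, ih]
        simp [List.append_assoc]
      | false =>
        have hb2 : pvB2 k = true := by simp [pvB2, hb0, hb1]
        simp only [List.foldl_cons, hb0, hb1, hb2, List.filter_cons, ih]
        simp [List.append_assoc]

-- sorted2 with keys (pvGroup, id) is sorted with the single lexicographic key pvKey.
lemma pvSorted2_eq_sorted_lex (a : List String) :
    PySem.List.sorted2 a pvGroup (fun key => key) false
      = PySem.List.sorted a pvKey false := by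
  rw [PySem.List.sorted_eq_foldl_insertBy]
  have hfun :
      (fun p q => decide (pvGroup p < pvGroup q) ||
        (!decide (pvGroup q < pvGroup p) && decide (p < q)))
      = (fun p q => decide (pvKey p < pvKey q)) := by
    funext p q
    by_cases h1 : pvGroup p < pvGroup q
    · simp [h1, pvKey, Prod.Lex.lt_iff]
    · by_cases h2 : pvGroup q < pvGroup p
      · have : ¬ (pvGroup p = pvGroup q) := by omega
        simp [h1, h2, pvKey, Prod.Lex.lt_iff, this]
      · have he : pvGroup p = pvGroup q := by omega
        simp [he, pvKey, Prod.Lex.lt_iff]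
  simp only [PySem.List.sorted2, hfun]
  rfl

-- a is (a permutation of) the concatenation of its three buckets.
lemma pvPartitionPerm (a : List String) :
    (a.filter pvB0 ++ (a.filter pvB1 ++ a.filter pvB2)).Perm a := by
  have h1 : (a.filter pvB0 ++ a.filter (fun k => !pvB0 k)).Perm a :=
    List.filter_append_perm _ _
  have h2 : ((a.filter (fun k => !pvB0 k)).filter pvB1
      ++ (a.filter (fun k => !pvB0 k)).filter (fun k => !pvB1 k)).Perm
      (a.filter (fun k => !pvB0 k)) := List.filter_append_perm _ _
  rw [List.filter_filter, List.filter_filter] at h2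
  have e1 : a.filter (fun k => pvB1 k && !pvB0 k) = a.filter pvB1 := by
    apply List.filter_congr
    intro k _
    by_cases h : pvB1 k
    · have : pvB0 k = false := by
        simp only [pvB0, pvB1, beq_iff_eq] at *
        rw [h]; simp
      simp [h, this]
    · simp [h]
  have e2 : a.filter (fun k => !pvB1 k && !pvB0 k) = a.filter pvB2 := by
    apply List.filter_congr; intro k _; simp [pvB2]
  rw [e1, e2] at h2
  exact ((h2.append_left (a.filter pvB0)).trans h1)

lemma pvKey_injective : Function.Injective pvKey := by
  intro p q h
  have := congrArg (fun z => (ofLex z).2) h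
  simpa [pvKey] using this

-- key-≤-pairwise for one sorted bucket whose elements all have group g.
lemma pvBucketPairwise (l : List String) (g : Int)
    (hg : ∀ k ∈ l, pvGroup k = g) :
    List.Pairwise (fun p q => pvKey p ≤ pvKey q) (PySem.List.sorted l (fun k => k) false) := by
  have hle := PySem.List.sorted_pairwise l (fun k => k)
  refine hle.imp_of_mem ?_
  intro p q hp hq hpq
  have hp' := hg p ((PySem.List.mem_sorted l _ false p).mp hp)
  have hq' := hg q ((PySem.List.mem_sorted l _ false q).mp hq)
  rw [Prod.Lex.le_iff]
  right
  exact ⟨by simp [pvKey, hp', hq'], by simpa [pvKey] using hpq⟩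

lemma pvMain (a : List String) : sorted_learned_keys a = sorted_learned_keys_alt a := by
  unfold sorted_learned_keys sorted_learned_keys_alt
  rw [pvSorted2_eq_sorted_lex, pvBucketFold]
  simp only [List.nil_append]
  have mf0 : ∀ k ∈ a.filter pvB0, pvGroup k = 0 :=
    fun k hk => pvGroup_of_B0 (List.mem_filter.mp hk).2
  have mf1 : ∀ k ∈ a.filter pvB1, pvGroup k = 1 :=
    fun k hk => pvGroup_of_B1 (List.mem_filter.mp hk).2
  have mf2 : ∀ k ∈ a.filter pvB2, pvGroup k = 2 :=
    fun k hk => pvGroup_of_B2 (List.mem_filter.mp hk).2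
  have m0 : ∀ k ∈ PySem.List.sorted (a.filter pvB0) (fun k => k) false, pvGroup k = 0 :=
    fun k hk => mf0 k ((PySem.List.mem_sorted _ _ _ k).mp hk)
  have m1 : ∀ k ∈ PySem.List.sorted (a.filter pvB1) (fun k => k) false, pvGroup k = 1 :=
    fun k hk => mf1 k ((PySem.List.mem_sorted _ _ _ k).mp hk)
  have m2 : ∀ k ∈ PySem.List.sorted (a.filter pvB2) (fun k => k) false, pvGroup k = 2 :=
    fun k hk => mf2 k ((PySem.List.mem_sorted _ _ _ k).mp hk)
  have hcross : ∀ {g1 g2 : Int} {l1 l2 : List String}, g1 < g2 →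
      (∀ k ∈ l1, pvGroup k = g1) → (∀ k ∈ l2, pvGroup k = g2) →
      ∀ p ∈ l1, ∀ q ∈ l2, pvKey p ≤ pvKey q := by
    intro g1 g2 l1 l2 hlt hm1 hm2 p hp q hq
    apply le_of_lt
    rw [pvKey, pvKey, Prod.Lex.lt_iff]
    left
    simpa [hm1 p hp, hm2 q hq] using hlt
  have hperm : (PySem.List.sorted (a.filter pvB0) (fun k => k) false
      ++ PySem.List.sorted (a.filter pvB1) (fun k => k) false
      ++ PySem.List.sorted (a.filter pvB2) (fun k => k) false).Perm a := by
    rw [List.append_assoc]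
    exact ((PySem.List.sorted_perm _ _ _).append
      ((PySem.List.sorted_perm _ _ _).append (PySem.List.sorted_perm _ _ _))).trans
      (pvPartitionPerm a)
  have hpw : List.Pairwise (fun p q => pvKey p ≤ pvKey q)
      (PySem.List.sorted (a.filter pvB0) (fun k => k) false
        ++ PySem.List.sorted (a.filter pvB1) (fun k => k) false
        ++ PySem.List.sorted (a.filter pvB2) (fun k => k) false) := by
    rw [List.append_assoc, List.pairwise_append, List.pairwise_append]
    refine ⟨pvBucketPairwise _ 0 mf0,
      ⟨pvBucketPairwise _ 1 mf1, pvBucketPairwise _ 2 mf2,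
        hcross (g1 := 1) (g2 := 2) (by norm_num) m1 m2⟩, ?_⟩
    intro p hp q hq
    rcases List.mem_append.mp hq with hq1 | hq2
    · exact hcross (g1 := 0) (g2 := 1) (by norm_num) m0 m1 p hp q hq1
    · exact hcross (g1 := 0) (g2 := 2) (by norm_num) m0 m2 p hp q hq2
  exact PySem.List.eq_of_perm_of_pairwise_le_of_injective pvKey pvKey_injective
    (hperm.trans (PySem.List.sorted_perm a pvKey false).symm) hpw
    (PySem.List.sorted_pairwise a pvKey)

-- ===== VERDICT (by name: the statement is the Claim_ definition above) =====
theorem sorted_learned_keys_spec : Claim_equal_sorted_learned_keys := by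
  intro a _ _
  unfold Spec_sorted_learned_keys
  exact pvMain a
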